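-- pv_equiv track=rewrite | github.com/PINTO0309/onnx2tf | onnx2tf/tflite_builder/ir.py | _is_inverse_perm
-- ===== SOURCE A (Python) =====
-- from typing import Any, Dict, List, Optional, Tuple, Union
--
-- def _is_inverse_perm(perm_a: List[int], perm_b: List[int]) -> bool:
--     if len(perm_a) != len(perm_b):
--         return False
--     rank = len(perm_a)
--     if sorted(int(v) for v in perm_a) != list(range(rank)):
--         return False
--     if sorted(int(v) for v in perm_b) != list(range(rank)):
--         return False
--     return all(int(perm_b[int(perm_a[i])]) == int(i) for i in range(rank))
-- ===== SOURCE B (Python) =====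
-- from typing import List
--
-- def _is_inverse_perm(perm_a: List[int], perm_b: List[int]) -> bool:
--     if len(perm_a) != len(perm_b):
--         return False
--     rank = len(perm_a)
--
--     def _is_perm(perm):
--         seen = [False] * rank
--         for x in perm:
--             v = int(x)
--             if v < 0 or v >= rank or seen[v]:
--                 return False
--             seen[v] = True
--         return True
--
--     if not _is_perm(perm_a):
--         return False
--     if not _is_perm(perm_b):
--         return False
--     return all(int(perm_b[int(perm_a[i])]) == int(i) for i in range(rank))
-- ===== Notes on version B (the rewrite author's own statement) =====
-- stated objective: faster
-- what changed: Replaces the sort-and-compare-with-range permutation validation by a single-pass boolean occupancy table (seen array) that rejects out-of-range and duplicate values, keeping the final inverse check unchanged.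
import Mathlib
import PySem

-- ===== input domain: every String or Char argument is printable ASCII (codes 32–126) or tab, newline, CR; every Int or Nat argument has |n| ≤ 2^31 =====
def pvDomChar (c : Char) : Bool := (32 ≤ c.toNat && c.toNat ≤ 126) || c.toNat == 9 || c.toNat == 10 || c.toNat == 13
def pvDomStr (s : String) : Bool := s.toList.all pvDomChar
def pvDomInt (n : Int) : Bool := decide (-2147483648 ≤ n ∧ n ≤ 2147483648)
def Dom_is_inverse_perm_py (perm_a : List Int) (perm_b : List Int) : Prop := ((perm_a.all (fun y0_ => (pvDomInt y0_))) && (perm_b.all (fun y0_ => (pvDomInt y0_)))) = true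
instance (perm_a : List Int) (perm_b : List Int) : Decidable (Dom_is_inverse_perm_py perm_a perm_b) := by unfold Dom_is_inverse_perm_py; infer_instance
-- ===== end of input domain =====

-- B replaces A's sort-and-compare permutation validation by a one-pass boolean occupancy
-- table (O(n) instead of O(n log n)); the final inverse check is unchanged.

-- ===== PORT A =====
-- the final `all(...)`: perm_a/perm_b have been validated as permutations of range(rank),
-- so the indexing never raises; the `none` branches below are unreachable.
def is_inverse_perm_py (perm_a : List Int) (perm_b : List Int) : Bool :=
  if perm_a.length ≠ perm_b.length then false
  else  -- rank = len(perm_a), inlined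
    if PySem.List.sorted perm_a (fun v => v) ≠ PySem.List.pyRange 0 (perm_a.length : Int) 1 then false
    else if PySem.List.sorted perm_b (fun v => v) ≠ PySem.List.pyRange 0 (perm_a.length : Int) 1 then false
    else (PySem.List.pyRange 0 (perm_a.length : Int) 1).all (fun i =>
      match PySem.List.pyGet? perm_a i with
      | none => false
      | some v =>
        match PySem.List.pyGet? perm_b v with
        | none => false
        | some w => w == i)

-- ===== PORT B =====
-- the `for x in perm:` loop of B's `_is_perm`, carrying the `seen` occupancy list
def pvSeenLoop (rank : Nat) (seen : List Bool) : List Int → Bool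
  | [] => true
  | x :: xs =>
    if x < 0 || (rank : Int) ≤ x || seen.getD x.toNat false then false
    else pvSeenLoop rank (seen.set x.toNat true) xs

def pvIsPerm (rank : Nat) (perm : List Int) : Bool :=
  pvSeenLoop rank (List.replicate rank false) perm

def is_inverse_perm_py_alt (perm_a : List Int) (perm_b : List Int) : Bool :=
  if perm_a.length ≠ perm_b.length then false
  else  -- rank = len(perm_a), inlined
    if !pvIsPerm perm_a.length perm_a then false
    else if !pvIsPerm perm_a.length perm_b then false
    else (PySem.List.pyRange 0 (perm_a.length : Int) 1).all (fun i =>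
      match PySem.List.pyGet? perm_a i with
      | none => false
      | some v =>
        match PySem.List.pyGet? perm_b v with
        | none => false
        | some w => w == i)

-- ===== PRECONDITION & SPEC =====
def Spec_is_inverse_perm_py (perm_a : List Int) (perm_b : List Int) (out : Bool) : Prop := out = is_inverse_perm_py_alt perm_a perm_b
instance (perm_a : List Int) (perm_b : List Int) (out : Bool) : Decidable (Spec_is_inverse_perm_py perm_a perm_b out) := by unfold Spec_is_inverse_perm_py; infer_instance

-- ===== CLAIM (what is proved, stated in full; the proofs are below) =====
def Claim_equal_is_inverse_perm_py : Prop := ∀ (perm_a : List Int) (perm_b : List Int), Dom_is_inverse_perm_py perm_a perm_b → Spec_is_inverse_perm_py perm_a perm_b (is_inverse_perm_py perm_a perm_b)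

-- ===== LEMMAS AND PROOFS =====

-- invariant of B's seen-loop: it accepts iff every value is in range, fresh w.r.t. `seen`,
-- and the list has no duplicates
theorem pvSeenLoop_iff (rank : Nat) (xs : List Int) (seen : List Bool)
    (hlen : seen.length = rank) :
    pvSeenLoop rank seen xs = true ↔
      xs.Nodup ∧ ∀ v ∈ xs, 0 ≤ v ∧ v < (rank : Int) ∧ seen.getD v.toNat false = false := by
  induction xs generalizing seen with
  | nil => simp [pvSeenLoop]
  | cons x xs ih =>
    by_cases hbad : (x < 0 || (rank : Int) ≤ x || seen.getD x.toNat false) = true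
    · constructor
      · intro h
        simp only [pvSeenLoop] at h
        rw [if_pos hbad] at h
        cases h
      · rintro ⟨-, h⟩
        rcases h x List.mem_cons_self with ⟨h1, h2, h3⟩
        simp only [Bool.or_eq_true, decide_eq_true_eq] at hbad
        rcases hbad with (h' | h') | h'
        · omega
        · omega
        · rw [h3] at h'; cases h'
    · have hbad' := hbad
      simp only [Bool.or_eq_true, decide_eq_true_eq, not_or, Bool.not_eq_true] at hbad'
      obtain ⟨⟨hx0, hxr⟩, hseen⟩ := hbad'
      have hx0' : 0 ≤ x := by omega
      have hxr' : x < (rank : Int) := by omega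
      have hxlt : x.toNat < seen.length := by omega
      simp only [pvSeenLoop]
      rw [if_neg hbad]
      rw [ih (seen.set x.toNat true) (by simpa using hlen)]
      constructor
      · rintro ⟨hnd, hall⟩
        refine ⟨List.nodup_cons.mpr ⟨?_, hnd⟩, ?_⟩
        · intro hx
          rcases hall x hx with ⟨-, -, h3⟩
          rw [List.getD_eq_getElem _ _ (by simpa using hxlt),
              List.getElem_set] at h3
          simp at h3
        · intro v hv
          rcases List.mem_cons.mp hv with rfl | hv'
          · exact ⟨hx0', hxr', hseen⟩
          · rcases hall v hv' with ⟨h1, h2, h3⟩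
            refine ⟨h1, h2, ?_⟩
            rw [List.getD_eq_getElem _ _ (by simpa using (show v.toNat < seen.length by omega)),
                List.getElem_set] at h3
            split at h3
            · cases h3
            · rw [List.getD_eq_getElem _ _ (by omega)]; exact h3
      · rintro ⟨hnd, hall⟩
        rcases List.nodup_cons.mp hnd with ⟨hxnot, hnd'⟩
        refine ⟨hnd', ?_⟩
        intro v hv
        rcases hall v (List.mem_cons_of_mem _ hv) with ⟨h1, h2, h3⟩
        refine ⟨h1, h2, ?_⟩
        have hvlt : v.toNat < seen.length := by omega
        rw [List.getD_eq_getElem _ _ (by simpa using hvlt), List.getElem_set]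
        rw [List.getD_eq_getElem _ _ (by omega)] at h3
        have hne : x.toNat ≠ v.toNat := by
          intro h
          exact hxnot (by rwa [show x = v by omega])
        simp [hne, h3]

theorem pvIsPerm_iff (rank : Nat) (xs : List Int) :
    pvIsPerm rank xs = true ↔ xs.Nodup ∧ ∀ v ∈ xs, 0 ≤ v ∧ v < (rank : Int) := by
  rw [pvIsPerm, pvSeenLoop_iff rank xs _ List.length_replicate]
  constructor
  · rintro ⟨h1, h2⟩
    exact ⟨h1, fun v hv => ⟨(h2 v hv).1, (h2 v hv).2.1⟩⟩
  · rintro ⟨h1, h2⟩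
    refine ⟨h1, fun v hv => ⟨(h2 v hv).1, (h2 v hv).2, ?_⟩⟩
    have hv' := h2 v hv
    have hlt : v.toNat < (List.replicate rank false).length := by simp; omega
    rw [List.getD_eq_getElem _ _ hlt]
    simp

-- A's validation equals B's validation when rank = xs.length
theorem sorted_eq_range_iff (xs : List Int) :
    (PySem.List.sorted xs (fun v => v) = PySem.List.pyRange 0 (xs.length : Int) 1) ↔
      pvIsPerm xs.length xs = true := by
  rw [pvIsPerm_iff]
  constructor
  · intro h
    have hperm : xs.Perm (PySem.List.pyRange 0 (xs.length : Int) 1) := by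
      rw [← h]
      exact (PySem.List.sorted_perm xs (fun v => v) false).symm
    refine ⟨hperm.nodup_iff.mpr (PySem.List.nodup_pyRange_one _ _), ?_⟩
    intro v hv
    have := PySem.List.mem_pyRange_one.mp (hperm.mem_iff.mp hv)
    omega
  · rintro ⟨hnd, hmem⟩
    have hsub : xs ⊆ PySem.List.pyRange 0 (xs.length : Int) 1 := by
      intro v hv
      exact PySem.List.mem_pyRange_one.mpr ⟨(hmem v hv).1, (hmem v hv).2⟩
    have hperm : xs.Perm (PySem.List.pyRange 0 (xs.length : Int) 1) :=
      List.Subperm.perm_of_length_le (hnd.subperm hsub)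
        (by rw [PySem.List.length_pyRange_one]; omega)
    exact PySem.List.sorted_eq_of_perm_of_pairwise_lt xs _ _ hperm.symm
      (PySem.List.pairwise_lt_pyRange_one _ _)

-- ===== VERDICT (by name: the statement is the Claim_ definition above) =====
theorem is_inverse_perm_py_spec : Claim_equal_is_inverse_perm_py := by
  intro a b _
  unfold Spec_is_inverse_perm_py is_inverse_perm_py is_inverse_perm_py_alt
  by_cases hlen : a.length = b.length
  · rw [if_neg (not_not.mpr hlen)]
    rw [if_neg (not_not.mpr hlen)]
    have hbiff : (PySem.List.sorted b (fun v => v) = PySem.List.pyRange 0 (a.length : Int) 1)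
        ↔ pvIsPerm a.length b = true := by
      rw [hlen]; exact sorted_eq_range_iff b
    by_cases ha : pvIsPerm a.length a = true
    · have ha' := (sorted_eq_range_iff a).mpr ha
      rw [if_neg (show ¬(PySem.List.sorted a (fun v => v) ≠ PySem.List.pyRange 0 (a.length : Int) 1) from not_not.mpr ha'),
          if_neg (show ¬((!pvIsPerm a.length a) = true) by simp [ha])]
      by_cases hb : pvIsPerm a.length b = true
      · rw [if_neg (show ¬(PySem.List.sorted b (fun v => v) ≠ PySem.List.pyRange 0 (a.length : Int) 1) from not_not.mpr (hbiff.mpr hb)),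
            if_neg (show ¬((!pvIsPerm a.length b) = true) by simp [hb])]
      · rw [if_pos (show PySem.List.sorted b (fun v => v) ≠ PySem.List.pyRange 0 (a.length : Int) 1 from fun h => hb (hbiff.mp h)),
            if_pos (show (!pvIsPerm a.length b) = true by simp [hb])]
    · rw [if_pos (show PySem.List.sorted a (fun v => v) ≠ PySem.List.pyRange 0 (a.length : Int) 1 from fun h => ha ((sorted_eq_range_iff a).mp h)),
          if_pos (show (!pvIsPerm a.length a) = true by simp [ha])]
  · rw [if_pos hlen, if_pos hlen]
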